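-- pv_equiv track=rewrite | github.com/yeqingteng/Beyond-Static-Artifacts | code/propagation/hub_processing_verdict.py | _format_character_profile
-- ===== SOURCE A (Python) =====
-- from typing import Dict, Any, List, Optional, Tuple
--
-- def _format_character_profile(character_profile: Dict[str, Any]) -> str:
--     ordered_keys = [
--         "name",
--         "religious",
--         "employment",
--         "marital",
--         "ideology",
--         "income",
--         "area",
--         "age",
--         "gender",
--         "big_five",
--         "education",
--         "job"
--     ]
--
--     lines = []
--     for key in ordered_keys:
--         if key in character_profile:
--             lines.append(f"- {key}: {character_profile[key]}")
--
--     for key, value in character_profile.items():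
--         if key not in ordered_keys:
--             lines.append(f"- {key}: {value}")
--
--     return "\n".join(lines)
-- ===== SOURCE B (Python) =====
-- def _format_character_profile(character_profile):
--     ordered_keys = [
--         "name",
--         "religious",
--         "employment",
--         "marital",
--         "ideology",
--         "income",
--         "area",
--         "age",
--         "gender",
--         "big_five",
--         "education",
--         "job"
--     ]
--     n = len(ordered_keys)
--     rank = {k: i for i, k in enumerate(ordered_keys)}
--     buckets = [[] for _ in range(n + 1)]
--     for key, value in character_profile.items():
--         buckets[rank.get(key, n)].append(f"- {key}: {value}")
--     return "\n".join(line for bucket in buckets for line in bucket)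
-- ===== Notes on version B (the rewrite author's own statement) =====
-- stated objective: alternative
-- what changed: Replaces A's two passes (a scan over the 12 ordered keys with a dict membership test each, then a scan over the items with a list membership test each) by a one-pass bucket sort: a rank index built once, each item dropped into buckets[rank.get(key, n)] in a single pass, then the buckets concatenated.
import Mathlib
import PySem

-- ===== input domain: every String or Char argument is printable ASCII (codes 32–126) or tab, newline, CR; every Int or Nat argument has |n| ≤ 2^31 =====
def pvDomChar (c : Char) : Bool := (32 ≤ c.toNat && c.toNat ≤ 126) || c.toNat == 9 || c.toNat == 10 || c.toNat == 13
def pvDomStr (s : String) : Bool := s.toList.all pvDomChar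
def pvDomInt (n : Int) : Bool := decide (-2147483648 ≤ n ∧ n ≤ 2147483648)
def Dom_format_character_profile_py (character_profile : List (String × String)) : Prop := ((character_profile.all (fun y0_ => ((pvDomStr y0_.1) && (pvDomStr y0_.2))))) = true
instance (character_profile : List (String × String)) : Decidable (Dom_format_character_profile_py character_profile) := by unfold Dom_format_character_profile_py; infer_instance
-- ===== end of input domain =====

-- B replaces A's two formatting passes by a one-pass bucket sort (rank index built once,
-- items dropped into buckets, buckets concatenated); same output, proved equal on dicts
-- (association lists with pairwise-distinct keys).


-- ===== PORT A =====
def format_character_profile_py (character_profile : List (String × String)) : String :=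
  let orderedKeys : List String :=
    ["name", "religious", "employment", "marital", "ideology", "income",
     "area", "age", "gender", "big_five", "education", "job"]
  let d : PySem.Dict String String := PySem.Dict.mk character_profile
  let lines : List String :=
    orderedKeys.foldl (fun lines key =>
      if d.contains key then
        -- character_profile[key]: the branch guard makes the lookup total
        lines ++ ["- " ++ key ++ ": " ++ ((d.get? key).getD "")]
      else lines) []
  let lines : List String :=
    d.items.foldl (fun lines kv =>
      if !(orderedKeys.contains kv.1) then
        lines ++ ["- " ++ kv.1 ++ ": " ++ kv.2]
      else lines) lines
  PySem.Str.join "\n" lines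

-- ===== PORT B =====
def format_character_profile_py_alt (character_profile : List (String × String)) : String :=
  let orderedKeys : List String :=
    ["name", "religious", "employment", "marital", "ideology", "income",
     "area", "age", "gender", "big_five", "education", "job"]
  let n : Int := (orderedKeys.length : Int)
  let rank : PySem.Dict String Int :=
    (PySem.List.enumerate orderedKeys).foldl (fun d p => d.insert p.2 p.1) PySem.Dict.empty
  let buckets : List (List String) := List.replicate (orderedKeys.length + 1) []
  let buckets : List (List String) :=
    character_profile.foldl (fun bs kv =>
      -- rank.get(key, n) lies in [0, n], so .toNat is exact here
      let r : Nat := (rank.getD kv.1 n).toNat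
      bs.set r ((bs.getD r []) ++ ["- " ++ kv.1 ++ ": " ++ kv.2])) buckets
  PySem.Str.join "\n" buckets.flatten

-- ===== PRECONDITION & SPEC =====
-- Pre_ excludes lists with duplicate keys: the argument models a Python dict, which
-- cannot hold two entries with the same key.
def Pre_format_character_profile_py (character_profile : List (String × String)) : Prop :=
  (character_profile.map Prod.fst).Nodup
instance (character_profile : List (String × String)) : Decidable (Pre_format_character_profile_py character_profile) := by unfold Pre_format_character_profile_py; infer_instance
def pvWitness_format_character_profile_py : (List (String × String)) :=
  [("name", "Alice"), ("hobby", "chess"), ("age", "30")]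
def Spec_format_character_profile_py (character_profile : List (String × String)) (out : String) : Prop := out = format_character_profile_py_alt character_profile
instance (character_profile : List (String × String)) (out : String) : Decidable (Spec_format_character_profile_py character_profile out) := by unfold Spec_format_character_profile_py; infer_instance

-- ===== CLAIM (what is proved, stated in full; the proofs are below) =====
def Claim_equal_format_character_profile_py : Prop := ∀ (character_profile : List (String × String)), Dom_format_character_profile_py character_profile → Pre_format_character_profile_py character_profile → Spec_format_character_profile_py character_profile (format_character_profile_py character_profile)

-- ===== LEMMAS AND PROOFS =====

theorem rank_get?_eq (ks : List String) (s0 : Int) (d0 : PySem.Dict String Int)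
    (hnd : ks.Nodup) (x : String) :
    ((PySem.List.enumerate ks s0).foldl (fun d p => d.insert p.2 p.1) d0).get? x
      = if x ∈ ks then some (s0 + ks.idxOf x) else d0.get? x := by
  induction ks generalizing s0 d0 with
  | nil => simp
  | cons k t ih =>
    have hkt : k ∉ t := (List.nodup_cons.mp hnd).1
    rw [PySem.List.enumerate_cons]
    simp only [List.foldl_cons]
    rw [ih _ _ (List.nodup_cons.mp hnd).2]
    by_cases hxt : x ∈ t
    · have hxk : x ≠ k := fun h => hkt (h ▸ hxt)
      simp [hxt, hxk, List.idxOf_cons_ne _ (Ne.symm hxk)]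
      omega
    · simp only [hxt, if_false, PySem.Dict.get?_insert]
      by_cases hxk : x = k
      · subst hxk; simp [List.idxOf_cons_self]
      · simp [hxt, hxk]

theorem filter_key_eq (cp : List (String × String)) (hnd : (cp.map Prod.fst).Nodup) (k : String) :
    cp.filter (fun kv => kv.1 == k)
      = ((PySem.Dict.mk cp).get? k).elim [] (fun v => [(k, v)]) := by
  induction cp with
  | nil => simp [PySem.Dict.get?]
  | cons p t ih =>
    rw [List.filter_cons, PySem.Dict.get?_mk_cons]
    simp only [List.map_cons, List.nodup_cons] at hnd
    by_cases hpk : p.1 = k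
    · have ht : t.filter (fun kv => kv.1 == k) = [] := by
        rw [List.filter_eq_nil_iff]
        intro kv hkv
        simp only [beq_iff_eq]
        intro h; exact hnd.1 (by rw [hpk, ← h]; exact List.mem_map_of_mem hkv)
      have hbe : (p.1 == k) = true := beq_iff_eq.mpr hpk
      rw [hbe]
      simp only [if_true, ht, Option.elim]
      have : p = (k, p.2) := by
        obtain ⟨a, b⟩ := p; simp at hpk ⊢; exact hpk
      rw [this]
    · have hbe : (p.1 == k) = false := by simp [hpk]
      rw [hbe]
      simp only [Bool.false_eq_true, if_false, ih hnd.2]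

theorem flatMap_if_singleton {β : Type} (ks : List String) (p : String → Bool) (h : String → β) :
    ks.flatMap (fun k => if p k then [h k] else []) = (ks.filter p).map h := by
  induction ks with
  | nil => simp
  | cons k t ih =>
    rw [List.flatMap_cons, List.filter_cons, ih]
    by_cases hp : p k <;> simp [hp]

theorem getD_set {β : Type} (l : List (List β)) (i j : Nat) (v : List β) :
    (l.set i v).getD j [] = if i = j ∧ i < l.length then v else l.getD j [] := by
  simp only [List.getD, List.getElem?_set]
  split_ifs with h1 h2 h3 <;> simp_all
  omega

theorem foldl_bucket {α β : Type} (l : List α) (g : α → Nat) (f : α → β)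
    (bs : List (List β)) (h : ∀ x ∈ l, g x < bs.length) :
    l.foldl (fun bs x => bs.set (g x) ((bs.getD (g x) []) ++ [f x])) bs
      = (List.range bs.length).map (fun r => bs.getD r [] ++ (l.filter (fun x => g x == r)).map f) := by
  induction l generalizing bs with
  | nil =>
    simp only [List.foldl_nil, List.filter_nil, List.map_nil, List.append_nil]
    apply List.ext_getElem
    · simp
    · intro i h1 h2
      simp [List.getD_eq_getElem?_getD, List.getElem?_eq_getElem h1]
  | cons x t ih =>
    simp only [List.foldl_cons]
    have hx : g x < bs.length := h x (List.mem_cons_self ..)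
    have hlen : (bs.set (g x) ((bs.getD (g x) []) ++ [f x])).length = bs.length := by simp
    rw [ih _ (by intro y hy; rw [hlen]; exact h y (List.mem_cons_of_mem _ hy))]
    rw [hlen]
    apply List.map_congr_left
    intro r hr
    have hrlt : r < bs.length := List.mem_range.mp hr
    rw [getD_set, List.filter_cons]
    by_cases hgr : g x = r
    · simp [hgr, hrlt]
    · have : (g x == r) = false := by simp [hgr]
      simp [this, hgr]

theorem flatMap_range_getD {β : Type} (ks : List String) (G : String → List β) :
    (List.range ks.length).flatMap (fun r => G (ks.getD r "")) = ks.flatMap G := by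
  rw [← List.flatMap_map (fun r => ks.getD r "") G (List.range ks.length)]
  congr 1
  apply List.ext_getElem
  · simp
  · intro i h1 h2
    simp [List.getD_eq_getElem?_getD, List.getElem?_eq_getElem h2]

theorem main_lines (ks : List String) (hks : ks.Nodup) (cp : List (String × String))
    (hnd : (cp.map Prod.fst).Nodup) :
    (PySem.Dict.mk cp).items.foldl (fun lines kv =>
        if !(ks.contains kv.1) then lines ++ ["- " ++ kv.1 ++ ": " ++ kv.2] else lines)
      (ks.foldl (fun lines key =>
        if (PySem.Dict.mk cp).contains key then
          lines ++ ["- " ++ key ++ ": " ++ (((PySem.Dict.mk cp).get? key).getD "")]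
        else lines) [])
    = (cp.foldl (fun bs kv =>
        bs.set ((((PySem.List.enumerate ks).foldl (fun d p => d.insert p.2 p.1) PySem.Dict.empty).getD kv.1 (ks.length : Int)).toNat)
          ((bs.getD ((((PySem.List.enumerate ks).foldl (fun d p => d.insert p.2 p.1) PySem.Dict.empty).getD kv.1 (ks.length : Int)).toNat) [])
            ++ ["- " ++ kv.1 ++ ": " ++ kv.2]))
        (List.replicate (ks.length + 1) [])).flatten := by
  have hitems : (PySem.Dict.mk cp).items = cp := rfl
  -- the rank function B computes
  have hg : ∀ s : String,
      (((PySem.List.enumerate ks).foldl (fun d p => d.insert p.2 p.1) PySem.Dict.empty).getD s (ks.length : Int)).toNat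
        = if s ∈ ks then ks.idxOf s else ks.length := by
    intro s
    rw [PySem.Dict.getD_eq_get?_getD, rank_get?_eq ks 0 _ hks s]
    by_cases hs : s ∈ ks
    · simp [hs]
    · simp [hs, PySem.Dict.get?_empty]
  -- A side
  rw [PySem.List.foldl_append_if (p := fun key => (PySem.Dict.mk cp).contains key)
        (f := fun key => "- " ++ key ++ ": " ++ (((PySem.Dict.mk cp).get? key).getD ""))]
  rw [hitems]
  rw [PySem.List.foldl_append_if (p := fun kv : String × String => !(ks.contains kv.1))
        (f := fun kv : String × String => "- " ++ kv.1 ++ ": " ++ kv.2)]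
  -- B side
  rw [foldl_bucket cp
        (g := fun kv => (((PySem.List.enumerate ks).foldl (fun d p => d.insert p.2 p.1) PySem.Dict.empty).getD kv.1 (ks.length : Int)).toNat)
        (f := fun kv => "- " ++ kv.1 ++ ": " ++ kv.2)
        (bs := List.replicate (ks.length + 1) [])
        (by intro kv _
            dsimp only
            rw [List.length_replicate, hg]
            split
            · exact Nat.lt_succ_of_lt (List.idxOf_lt_length_of_mem (by assumption))
            · exact Nat.lt_succ_self _)]
  simp only [List.length_replicate]
  have hrep : ∀ r : Nat, (List.replicate (ks.length + 1) ([] : List String)).getD r [] = [] := by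
    intro r; simp [List.getD]
  simp only [hg, hrep, List.nil_append]
  rw [← List.flatMap_def, List.range_succ, List.flatMap_append]
  congr 1
  -- ordered-keys part
  · rw [List.flatMap_def, List.map_congr_left (l := List.range ks.length)
        (f := fun r => (cp.filter (fun kv => (if kv.1 ∈ ks then ks.idxOf kv.1 else ks.length) == r)).map (fun kv => "- " ++ kv.1 ++ ": " ++ kv.2))
        (g := fun r => (cp.filter (fun kv => kv.1 == ks.getD r "")).map (fun kv => "- " ++ kv.1 ++ ": " ++ kv.2))
        (by intro r hr
            have hrm : r < ks.length := List.mem_range.mp hr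
            dsimp only
            congr 1
            apply List.filter_congr
            intro kv _
            have hksr : ks.getD r "" = ks[r] := by rw [List.getD_eq_getElem?_getD, List.getElem?_eq_getElem hrm]; rfl
            rw [hksr]
            by_cases hmem : kv.1 ∈ ks
            · simp only [hmem, if_true]
              by_cases heq : kv.1 = ks[r]
              · simp [heq, List.Nodup.idxOf_getElem hks r hrm]
              · have hne : ks.idxOf kv.1 ≠ r := by
                  intro h
                  apply heq
                  subst h
                  exact (List.getElem_idxOf (List.idxOf_lt_length_of_mem hmem)).symm
                simp [hne, heq]
            · have h1 : (ks.length == r) ≠ true := by simp; omega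
              have h2 : kv.1 ≠ ks[r] := fun hh => hmem (hh ▸ ks.getElem_mem hrm)
              simp [hmem, h2]; omega)]
    rw [← List.flatMap_def, flatMap_range_getD ks (fun k => (cp.filter (fun kv => kv.1 == k)).map (fun kv => "- " ++ kv.1 ++ ": " ++ kv.2))]
    rw [← flatMap_if_singleton ks (fun k => (PySem.Dict.mk cp).contains k)
          (fun key => "- " ++ key ++ ": " ++ (((PySem.Dict.mk cp).get? key).getD ""))]
    congr 1
    funext k
    rw [filter_key_eq cp hnd k]
    rw [PySem.Dict.contains_eq_isSome_get?]
    cases hq : (PySem.Dict.mk cp).get? k with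
    | none => simp
    | some v => simp
  -- extras part
  · simp only [List.flatMap_cons, List.flatMap_nil, List.append_nil]
    congr 1
    apply List.filter_congr
    intro kv _
    by_cases hmem : kv.1 ∈ ks
    · have : ks.idxOf kv.1 < ks.length := List.idxOf_lt_length_of_mem hmem
      simp [hmem]; omega
    · simp [hmem]


-- ===== VERDICT (by name: the statement is the Claim_ definition above) =====
theorem format_character_profile_py_spec : Claim_equal_format_character_profile_py := by
  intro cp _ hpre
  unfold Spec_format_character_profile_py format_character_profile_py format_character_profile_py_alt
  exact congrArg (PySem.Str.join "\n")
    (main_lines ["name", "religious", "employment", "marital", "ideology", "income",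
                 "area", "age", "gender", "big_five", "education", "job"] (by decide) cp hpre)
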